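-- pv_equiv track=rewrite | github.com/rkverma1984/pia-x | toolset/common/anal_interface_contact.py | convert_rec_resids_to_indexlabels
-- ===== SOURCE A (Python) =====
-- def convert_rec_resids_to_indexlabels(indata, indict_tm, indict_loop):
--     '''
--     '''
--     _indexlabels = []
--     for i in indata:
--         try:
--             _indexlabels.append(indict_tm[int(i)])
--         except:
--             _indexlabels.append(indict_loop[int(i)])
--     return _indexlabels
-- ===== SOURCE B (Python) =====
-- def convert_rec_resids_to_indexlabels(indata, indict_tm, indict_loop):
--     # Group positions by key, resolve each distinct key once, scatter labels.
--     n = len(indata)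
--     pos = {}
--     for j, i in enumerate(indata):
--         k = int(i)
--         pos[k] = pos.get(k, []) + [j]
--     out = [""] * n
--     for k, js in pos.items():
--         lbl = indict_tm[k] if k in indict_tm else indict_loop[k]
--         for j in js:
--             out[j] = lbl
--     return out
-- ===== Notes on version B (the rewrite author's own statement) =====
-- stated objective: alternative
-- what changed: Instead of probing the dicts once per element, B builds an inverted index from each distinct key to its positions in indata, resolves each distinct key once (tm first, else loop), and scatters the label into a preallocated output list.
import Mathlib
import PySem

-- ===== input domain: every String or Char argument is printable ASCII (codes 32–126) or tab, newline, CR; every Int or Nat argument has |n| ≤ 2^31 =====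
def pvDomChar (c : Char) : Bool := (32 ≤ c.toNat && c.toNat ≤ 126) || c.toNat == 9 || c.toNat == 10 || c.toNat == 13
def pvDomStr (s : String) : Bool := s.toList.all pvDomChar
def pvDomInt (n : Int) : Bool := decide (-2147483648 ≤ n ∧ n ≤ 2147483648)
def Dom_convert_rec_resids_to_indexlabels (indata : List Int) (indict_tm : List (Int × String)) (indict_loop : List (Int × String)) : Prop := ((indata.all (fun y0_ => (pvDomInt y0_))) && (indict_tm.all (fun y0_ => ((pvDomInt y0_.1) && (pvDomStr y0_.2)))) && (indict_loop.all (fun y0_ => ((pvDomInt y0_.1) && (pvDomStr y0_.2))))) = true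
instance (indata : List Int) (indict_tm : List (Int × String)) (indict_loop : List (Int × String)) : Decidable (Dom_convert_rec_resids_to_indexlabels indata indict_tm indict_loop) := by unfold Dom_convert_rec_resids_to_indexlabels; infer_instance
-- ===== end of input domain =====

-- B replaces A's per-element try/except probe of two dicts by a group-and-scatter pass:
-- an inverted index key → positions, one resolution per distinct key, labels scattered
-- into a preallocated output (objective: alternative algorithm).

-- ===== PORT A =====
-- A: for each i, append indict_tm[int(i)]; on exception (missing key) append indict_loop[int(i)].
-- The inner default "" is never used under Pre_ (where Python would raise KeyError instead).
def convert_rec_resids_to_indexlabels (indata : List Int) (indict_tm : List (Int × String)) (indict_loop : List (Int × String)) : List String :=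
  let tm := PySem.Dict.ofList indict_tm
  let lp := PySem.Dict.ofList indict_loop
  indata.foldl (fun acc i =>
    match tm.get? i with
    | some v => acc ++ [v]
    | none => acc ++ [(lp.get? i).getD ""]) []

-- ===== PORT B =====
-- B (Source B): pos = inverted index k → positions via pos[k] = pos.get(k, []) + [j];
-- out = [""] * n; for k, js in pos.items(): lbl resolved once; out[j] = lbl for j in js.
-- j.toNat is exact: enumerate indices are ≥ 0. Defaults "" are never used under Pre_
-- (missing keys raise KeyError in Python; 'k in tm' guards tm's lookup).
def convert_rec_resids_to_indexlabels_alt (indata : List Int) (indict_tm : List (Int × String)) (indict_loop : List (Int × String)) : List String :=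
  let tm := PySem.Dict.ofList indict_tm
  let lp := PySem.Dict.ofList indict_loop
  let n := indata.length
  let pos := (PySem.List.enumerate indata).foldl
      (fun d ji => d.modify ji.2 [] (fun l => l ++ [ji.1])) PySem.Dict.empty
  pos.items.foldl
    (fun out kjs =>
      let lbl := if tm.contains kjs.1 then (tm.get? kjs.1).getD "" else (lp.get? kjs.1).getD ""
      kjs.2.foldl (fun o j => o.set j.toNat lbl) out)
    (List.replicate n "")

-- ===== PRECONDITION & SPEC =====
-- Pre_ excludes exactly the inputs where A raises KeyError: some element of indata
-- is a key of neither dict (B raises KeyError there too).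
def Pre_convert_rec_resids_to_indexlabels (indata : List Int) (indict_tm : List (Int × String)) (indict_loop : List (Int × String)) : Prop :=
  ∀ i ∈ indata, i ∈ indict_tm.map Prod.fst ∨ i ∈ indict_loop.map Prod.fst
instance (indata : List Int) (indict_tm : List (Int × String)) (indict_loop : List (Int × String)) : Decidable (Pre_convert_rec_resids_to_indexlabels indata indict_tm indict_loop) := by unfold Pre_convert_rec_resids_to_indexlabels; infer_instance

def pvWitness_convert_rec_resids_to_indexlabels : List Int × (List (Int × String)) × (List (Int × String)) :=
  ([1, 2, 1], [(1, "tm1")], [(2, "lp2"), (1, "lp1")])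

def Spec_convert_rec_resids_to_indexlabels (indata : List Int) (indict_tm : List (Int × String)) (indict_loop : List (Int × String)) (out : List String) : Prop := out = convert_rec_resids_to_indexlabels_alt indata indict_tm indict_loop
instance (indata : List Int) (indict_tm : List (Int × String)) (indict_loop : List (Int × String)) (out : List String) : Decidable (Spec_convert_rec_resids_to_indexlabels indata indict_tm indict_loop out) := by unfold Spec_convert_rec_resids_to_indexlabels; infer_instance

-- ===== CLAIM (what is proved, stated in full; the proofs are below) =====
def Claim_equal_convert_rec_resids_to_indexlabels : Prop := ∀ (indata : List Int) (indict_tm : List (Int × String)) (indict_loop : List (Int × String)), Dom_convert_rec_resids_to_indexlabels indata indict_tm indict_loop → Pre_convert_rec_resids_to_indexlabels indata indict_tm indict_loop → Spec_convert_rec_resids_to_indexlabels indata indict_tm indict_loop (convert_rec_resids_to_indexlabels indata indict_tm indict_loop)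

-- ===== LEMMAS AND PROOFS =====

-- The label both programs attach to a key (A via try/except, B via 'k in tm').
def pvResolve (tm lp : PySem.Dict Int String) (k : Int) : String :=
  match tm.get? k with
  | some v => v
  | none => (lp.get? k).getD ""

-- A is the map of pvResolve over indata.
theorem pvA_eq_map (indata : List Int) (indict_tm : List (Int × String)) (indict_loop : List (Int × String)) :
    convert_rec_resids_to_indexlabels indata indict_tm indict_loop
      = indata.map (pvResolve (PySem.Dict.ofList indict_tm) (PySem.Dict.ofList indict_loop)) := by
  simp only [convert_rec_resids_to_indexlabels]
  have hbody : (fun (acc : List String) (i : Int) =>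
        match (PySem.Dict.ofList indict_tm).get? i with
        | some v => acc ++ [v]
        | none => acc ++ [((PySem.Dict.ofList indict_loop).get? i).getD ""])
      = (fun acc i => acc ++ [pvResolve (PySem.Dict.ofList indict_tm) (PySem.Dict.ofList indict_loop) i]) := by
    funext acc i
    unfold pvResolve
    rcases (PySem.Dict.ofList indict_tm).get? i with _ | v <;> rfl
  rw [hbody, PySem.List.foldl_append_singleton_eq_map]
  rfl

-- B's per-key label equals pvResolve.
theorem pvResolve_eq_if (tm lp : PySem.Dict Int String) (k : Int) :
    (if tm.contains k then (tm.get? k).getD "" else (lp.get? k).getD "") = pvResolve tm lp k := by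
  unfold pvResolve
  rw [PySem.Dict.contains_eq_isSome_get?]
  rcases tm.get? k with _ | v <;> simp

-- Inner scatter loop: length is preserved.
theorem pvInner_length (js : List Int) (lbl : String) (out : List String) :
    (js.foldl (fun o j => o.set j.toNat lbl) out).length = out.length := by
  induction js generalizing out with
  | nil => rfl
  | cons j t ih => simp [List.foldl_cons, ih, List.length_set]

-- Inner scatter loop: pointwise effect (all positions nonnegative).
theorem pvInner_get (js : List Int) (lbl : String) (out : List String) (m : Nat)
    (hm : m < out.length) (hpos : ∀ j ∈ js, 0 ≤ j) :
    (js.foldl (fun o j => o.set j.toNat lbl) out)[m]?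
      = if (m : Int) ∈ js then some lbl else out[m]? := by
  induction js generalizing out with
  | nil => simp
  | cons j t ih =>
    have hj : 0 ≤ j := hpos j (List.mem_cons_self ..)
    have hml : m < (out.set j.toNat lbl).length := by simpa [List.length_set] using hm
    rw [List.foldl_cons, ih _ hml (fun x hx => hpos x (List.mem_cons_of_mem _ hx))]
    by_cases hmt : (m : Int) ∈ t
    · simp [hmt]
    · rw [if_neg hmt, List.getElem?_set]
      by_cases hje : (m : Int) = j
      · have hjt : j.toNat = m := by omega
        simp [hjt, hm, List.mem_cons, hje]
      · have hjt : j.toNat ≠ m := by omega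
        simp [hjt, List.mem_cons, hmt, hje]

-- Outer scatter loop over groups: length is preserved.
theorem pvOuter_length (tm lp : PySem.Dict Int String) (groups : List (Int × List Int)) (out : List String) :
    (groups.foldl (fun out kjs =>
        kjs.2.foldl (fun o j => o.set j.toNat
          (if tm.contains kjs.1 then (tm.get? kjs.1).getD "" else (lp.get? kjs.1).getD "")) out) out).length
      = out.length := by
  induction groups generalizing out with
  | nil => rfl
  | cons p t ih => rw [List.foldl_cons, ih, pvInner_length]

-- Outer scatter loop over groups: pointwise effect.
theorem pvOuter_get (indata : List Int) (tm lp : PySem.Dict Int String)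
    (groups : List (Int × List Int)) (out : List String) (m : Nat)
    (hlen : out.length = indata.length) (hm : m < indata.length)
    (hg : ∀ p ∈ groups, ∀ j ∈ p.2, ∃ (mm : Nat) (h : mm < indata.length), j = (mm : Int) ∧ indata[mm] = p.1) :
    (groups.foldl (fun out kjs =>
        kjs.2.foldl (fun o j => o.set j.toNat
          (if tm.contains kjs.1 then (tm.get? kjs.1).getD "" else (lp.get? kjs.1).getD "")) out) out)[m]?
      = if ∃ p ∈ groups, (m : Int) ∈ p.2 then some (pvResolve tm lp (indata[m])) else out[m]? := by
  induction groups generalizing out with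
  | nil => simp
  | cons p t ih =>
    have hpos : ∀ j ∈ p.2, 0 ≤ j := by
      intro j hj
      obtain ⟨mm, _, hjm, _⟩ := hg p (List.mem_cons_self ..) j hj
      omega
    have hlen' : (p.2.foldl (fun o j => o.set j.toNat
        (if tm.contains p.1 then (tm.get? p.1).getD "" else (lp.get? p.1).getD "")) out).length = indata.length := by
      rw [pvInner_length]; exact hlen
    rw [List.foldl_cons, ih _ hlen' (fun q hq => hg q (List.mem_cons_of_mem _ hq))]
    rw [pvInner_get _ _ _ _ (by omega) hpos]
    by_cases hmt : ∃ q ∈ t, (m : Int) ∈ q.2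
    · rw [if_pos hmt]
      have hcov : ∃ q ∈ p :: t, (m : Int) ∈ q.2 :=
        ⟨_, List.mem_cons_of_mem _ hmt.choose_spec.1, hmt.choose_spec.2⟩
      rw [if_pos hcov]
    · rw [if_neg hmt]
      by_cases hmp : (m : Int) ∈ p.2
      · have hcov : ∃ q ∈ p :: t, (m : Int) ∈ q.2 := ⟨p, List.mem_cons_self .., hmp⟩
        rw [if_pos hmp, if_pos hcov, pvResolve_eq_if]
        obtain ⟨mm, hmmlt, hjm, hval⟩ := hg p (List.mem_cons_self ..) _ hmp
        have : mm = m := by omega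
        subst this
        rw [hval]
      · have hcov : ¬ ∃ q ∈ p :: t, (m : Int) ∈ q.2 := by
          rintro ⟨q, hq, hmq⟩
          rcases List.mem_cons.mp hq with h | h
          · exact hmp (h ▸ hmq)
          · exact hmt ⟨q, h, hmq⟩
        rw [if_neg hmp, if_neg hcov]

theorem convert_rec_resids_to_indexlabels_spec : Claim_equal_convert_rec_resids_to_indexlabels := by
  intro indata indict_tm indict_loop _ hpre
  unfold Spec_convert_rec_resids_to_indexlabels
  rw [pvA_eq_map]
  simp only [convert_rec_resids_to_indexlabels_alt]
  set tm := PySem.Dict.ofList indict_tm with htm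
  set lp := PySem.Dict.ofList indict_loop with hlp
  set pos := (PySem.List.enumerate indata).foldl
      (fun d ji => d.modify ji.2 [] (fun l => l ++ [ji.1])) (PySem.Dict.empty : PySem.Dict Int (List Int)) with hposdef
  -- the let-bound label is the same as inlining it (zeta)
  rw [show (fun (out : List String) (kjs : Int × List Int) =>
        let lbl := if tm.contains kjs.1 then (tm.get? kjs.1).getD "" else (lp.get? kjs.1).getD ""
        kjs.2.foldl (fun o j => o.set j.toNat lbl) out)
      = (fun (out : List String) (kjs : Int × List Int) =>
        kjs.2.foldl (fun o j => o.set j.toNat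
          (if tm.contains kjs.1 then (tm.get? kjs.1).getD "" else (lp.get? kjs.1).getD "")) out) from rfl]
  -- characterize pos.getD
  have hgetD : ∀ k : Int, pos.getD k []
      = ((PySem.List.enumerate indata).filter (fun ji => ji.2 == k)).map (fun ji => ji.1) := by
    intro k
    have hswap : pos = ((PySem.List.enumerate indata).map (fun ji : Int × Int => (ji.2, ji.1))).foldl
        (fun d p => d.modify p.1 [] (fun l => l ++ [p.2])) PySem.Dict.empty := by
      rw [hposdef, List.foldl_map]
    rw [hswap, PySem.Dict.getD_foldl_modify_append]
    simp [List.filter_map, List.map_map, Function.comp_def]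
  have hmem_getD : ∀ (k : Int) (j : Int), j ∈ pos.getD k [] ↔
      ∃ (mm : Nat) (h : mm < indata.length), j = (mm : Int) ∧ indata[mm] = k := by
    intro k j
    rw [hgetD]
    simp only [List.mem_map, List.mem_filter]
    constructor
    · rintro ⟨ji, ⟨hmem, hk⟩, hj⟩
      obtain ⟨mm, hlt, hji⟩ := (PySem.List.mem_enumerate_iff _ _ _).mp hmem
      refine ⟨mm, hlt, ?_, ?_⟩
      · simp [hji] at hj; omega
      · have := beq_iff_eq.mp hk
        rw [hji] at this; simpa using this
    · rintro ⟨mm, hlt, hj, hk⟩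
      refine ⟨((mm : Int), indata[mm]), ⟨?_, by simp [hk]⟩, by simpa using hj.symm⟩
      exact (PySem.List.mem_enumerate_iff _ _ _).mpr ⟨mm, hlt, by simp⟩
  -- keys of pos
  have hnodup : pos.keys.Nodup :=
    PySem.Dict.nodup_keys_foldl_modify_key (PySem.List.enumerate indata)
      (fun ji => ji.2) [] (fun _ ji => (fun l => l ++ [ji.1])) PySem.Dict.empty
      (by simp [PySem.Dict.keys_empty])
  have hkeysEq : pos.keys = PySem.Set.update (PySem.Dict.empty : PySem.Dict Int (List Int)).keys
      ((PySem.List.enumerate indata).map (fun ji => ji.2)) :=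
    PySem.Dict.keys_foldl_modify_key (PySem.List.enumerate indata)
      (fun ji => ji.2) [] (fun _ ji => (fun l => l ++ [ji.1])) PySem.Dict.empty
  have hkeys : ∀ k : Int, k ∈ pos.keys ↔ k ∈ indata := by
    intro k
    rw [hkeysEq, PySem.Dict.keys_empty, PySem.Set.update_nil_left, PySem.List.map_snd_enumerate]
    exact PySem.Set.mem_ofList _ _
  have hitems : pos.items = pos.keys.map (fun k => (k, pos.getD k [])) :=
    PySem.Dict.items_eq_map_keys pos hnodup []
  -- the group hypothesis for pos.items
  have hg : ∀ p ∈ pos.items, ∀ j ∈ p.2,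
      ∃ (mm : Nat) (h : mm < indata.length), j = (mm : Int) ∧ indata[mm] = p.1 := by
    intro p hp j hj
    rw [hitems, List.mem_map] at hp
    obtain ⟨k, _, hpk⟩ := hp
    subst hpk
    exact (hmem_getD k j).mp hj
  -- coverage: each position belongs to some group
  have hcov : ∀ m : Nat, m < indata.length → ∃ p ∈ pos.items, (m : Int) ∈ p.2 := by
    intro m hm
    refine ⟨(indata[m], pos.getD (indata[m]) []), ?_, ?_⟩
    · rw [hitems, List.mem_map]
      exact ⟨indata[m], (hkeys _).mpr (List.getElem_mem hm), rfl⟩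
    · exact (hmem_getD _ _).mpr ⟨m, hm, rfl, rfl⟩
  -- conclude pointwise
  apply List.ext_getElem?
  intro m
  by_cases hm : m < indata.length
  · rw [pvOuter_get indata tm lp pos.items (List.replicate indata.length "") m
        (List.length_replicate) hm hg]
    rw [if_pos (hcov m hm)]
    simp [hm]
  · rw [List.getElem?_eq_none_iff.mpr (by simpa using Nat.le_of_not_lt hm),
        List.getElem?_eq_none_iff.mpr (by
          rw [pvOuter_length, List.length_replicate]; exact Nat.le_of_not_lt hm)]
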